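-- pv_equiv track=rewrite | github.com/ashirabrar3214/neuronity | backend/server.py | process_generational_history
-- ===== SOURCE A (Python) =====
-- def process_generational_history(history, max_turns=60):
--     """
--     CONTEXT DECAY: Full Detail -> Condensed -> Topic-Only.
--     Thresholds are generous to prevent topic amnesia in short sessions.
--     """
--     if not history: return []
--     raw = history[-max_turns:] if len(history) > max_turns else history
--     processed = []
--
--     # Process in reverse to count generation distance from CURRENT turn (index 0)
--     rev_raw = list(reversed(raw))
--     for i, msg in enumerate(rev_raw):
--         role = msg.get("role", "user")
--         content = str(msg.get("content", "") or "")
--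
--         # Generation 0 (Last 15 messages): Full detail
--         if i < 15:
--             processed.insert(0, {"role": role, "content": content})
--
--         # Generation 1 (Messages 16-30): Condensed — keep meaning, cut length
--         elif i < 30:
--             if content.startswith("[TOOL:"):
--                 # Keep tool name + first arg only, no artificial prefix that confuses parser
--                 tool_body = content[len("[TOOL:"):].rstrip("]")
--                 name_part = tool_body.split("(", 1)[0].strip()
--                 processed.insert(0, {"role": role, "content": f"[Previously used tool: {name_part}]"})
--             elif content.startswith("SYSTEM TOOL RESULT:"):
--                 preview = content[len("SYSTEM TOOL RESULT:"):].strip()[:150]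
--                 processed.insert(0, {"role": role, "content": f"[Tool result summary: {preview}...]"})
--             else:
--                 preview = content[:300] + "..." if len(content) > 300 else content
--                 processed.insert(0, {"role": role, "content": preview})
--
--         # Generation 2 (Messages 31-60): Topic-only metadata
--         else:
--             if content.startswith("[TOOL:"):
--                 tool_body = content[len("[TOOL:"):].rstrip("]")
--                 name_part = tool_body.split("(", 1)[0].strip()
--                 processed.insert(0, {"role": role, "content": f"[Past action: {name_part}]"})
--             else:
--                 processed.insert(0, {"role": role, "content": f"[Past message: {content[:80]}...]"})
--
--     return processed
-- ===== SOURCE B (Python) =====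
-- def _full(msg):
--     role = msg.get("role", "user")
--     content = str(msg.get("content", "") or "")
--     return {"role": role, "content": content}
--
-- def _condensed(msg):
--     role = msg.get("role", "user")
--     content = str(msg.get("content", "") or "")
--     if content.startswith("[TOOL:"):
--         tool_body = content[len("[TOOL:"):].rstrip("]")
--         name_part = tool_body.split("(", 1)[0].strip()
--         return {"role": role, "content": f"[Previously used tool: {name_part}]"}
--     if content.startswith("SYSTEM TOOL RESULT:"):
--         preview = content[len("SYSTEM TOOL RESULT:"):].strip()[:150]
--         return {"role": role, "content": f"[Tool result summary: {preview}...]"}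
--     preview = content[:300] + "..." if len(content) > 300 else content
--     return {"role": role, "content": preview}
--
-- def _topic(msg):
--     role = msg.get("role", "user")
--     content = str(msg.get("content", "") or "")
--     if content.startswith("[TOOL:"):
--         tool_body = content[len("[TOOL:"):].rstrip("]")
--         name_part = tool_body.split("(", 1)[0].strip()
--         return {"role": role, "content": f"[Past action: {name_part}]"}
--     return {"role": role, "content": f"[Past message: {content[:80]}...]"}
--
-- def process_generational_history(history, max_turns=60):
--     if not history:
--         return []
--     raw = history[-max_turns:] if len(history) > max_turns else history
--     n = len(raw)
--     full_start = max(0, n - 15)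
--     cond_start = max(0, n - 30)
--     return ([_topic(m) for m in raw[:cond_start]]
--             + [_condensed(m) for m in raw[cond_start:full_start]]
--             + [_full(m) for m in raw[full_start:]])
-- ===== Notes on version B (the rewrite author's own statement) =====
-- stated objective: alternative
-- what changed: Instead of reversing the list and building the result with insert(0) inside one loop that dispatches on the reversed index, B computes the two cut points once, slices the history into three contiguous segments and maps each segment with its tier transform, concatenating forward.
import Mathlib
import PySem

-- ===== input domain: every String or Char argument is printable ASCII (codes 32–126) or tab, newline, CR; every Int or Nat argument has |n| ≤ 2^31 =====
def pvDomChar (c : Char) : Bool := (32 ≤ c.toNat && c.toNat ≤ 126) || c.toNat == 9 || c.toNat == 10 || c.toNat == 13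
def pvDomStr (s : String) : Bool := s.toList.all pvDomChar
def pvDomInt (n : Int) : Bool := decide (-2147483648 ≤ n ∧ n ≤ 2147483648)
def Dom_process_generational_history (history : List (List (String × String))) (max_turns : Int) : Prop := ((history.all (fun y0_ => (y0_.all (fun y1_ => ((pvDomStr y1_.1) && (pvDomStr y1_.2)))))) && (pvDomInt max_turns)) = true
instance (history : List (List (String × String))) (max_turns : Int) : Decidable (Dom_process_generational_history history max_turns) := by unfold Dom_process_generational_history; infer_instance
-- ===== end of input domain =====

-- B replaces A's reversed insert(0)-loop with generation-index dispatch by three contiguous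
-- slices mapped tier-by-tier and concatenated forward (alternative decomposition, same values).


-- shared primitive substitutes (Python built-ins PySem does not provide directly)
-- Python string concatenation a + b, exact (kernel-transparent, unlike String.append)
def pyCat (a b : String) : String := String.ofList (a.toList ++ b.toList)
-- s.rstrip(chars): drop trailing characters that occur in chars (exact port of str.rstrip with argument)
def pyRstrip (s : String) (chars : String) : String :=
  String.ofList ((s.toList.reverse.dropWhile (fun c => chars.toList.contains c)).reverse)
-- s.split(sep, 1)[0] for sep ≠ "": split always returns some nonempty list, [0] is its head (exact)
def pySplitHead (s : String) (sep : String) : String :=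
  match PySem.Str.splitMax? s sep 1 with
  | some (x :: _) => x
  | _ => ""

-- ===== PORT A =====
def process_generational_history (history : List (List (String × String))) (max_turns : Int) : List (List (String × String)) :=
  if history = [] then []
  else
    let raw := if (history.length : Int) > max_turns then PySem.List.slice history (some (-max_turns)) none else history
    let rev_raw := raw.reverse
    (PySem.List.enumerate rev_raw).foldl (fun processed p =>
      let i := p.1
      let msg := p.2
      let role := PySem.Dict.getD ⟨msg⟩ "role" "user"
      -- str(msg.get("content","") or ""): on strings this is the plain lookup with default ""
      let content := PySem.Dict.getD ⟨msg⟩ "content" ""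
      (if i < 15 then
        [("role", role), ("content", content)]
      else if i < 30 then
        if PySem.Str.startswith content "[TOOL:" then
          let tool_body := pyRstrip (PySem.Str.slice content (some 6) none) "]"
          let name_part := PySem.Str.strip (pySplitHead tool_body "(")
          [("role", role), ("content", pyCat (pyCat "[Previously used tool: " name_part) "]")]
        else if PySem.Str.startswith content "SYSTEM TOOL RESULT:" then
          let preview := PySem.Str.slice (PySem.Str.strip (PySem.Str.slice content (some 19) none)) none (some 150)
          [("role", role), ("content", pyCat (pyCat "[Tool result summary: " preview) "...]")]
        else
          let preview := if PySem.Str.len content > 300 then pyCat (PySem.Str.slice content none (some 300)) "..." else content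
          [("role", role), ("content", preview)]
      else
        if PySem.Str.startswith content "[TOOL:" then
          let tool_body := pyRstrip (PySem.Str.slice content (some 6) none) "]"
          let name_part := PySem.Str.strip (pySplitHead tool_body "(")
          [("role", role), ("content", pyCat (pyCat "[Past action: " name_part) "]")]
        else
          [("role", role), ("content", pyCat (pyCat "[Past message: " (PySem.Str.slice content none (some 80))) "...]")]) :: processed) []

-- ===== PORT B =====
def pgh_full (msg : List (String × String)) : List (String × String) :=
  let role := PySem.Dict.getD ⟨msg⟩ "role" "user"
  let content := PySem.Dict.getD ⟨msg⟩ "content" ""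
  [("role", role), ("content", content)]

def pgh_condensed (msg : List (String × String)) : List (String × String) :=
  let role := PySem.Dict.getD ⟨msg⟩ "role" "user"
  let content := PySem.Dict.getD ⟨msg⟩ "content" ""
  if PySem.Str.startswith content "[TOOL:" then
    let tool_body := pyRstrip (PySem.Str.slice content (some 6) none) "]"
    let name_part := PySem.Str.strip (pySplitHead tool_body "(")
    [("role", role), ("content", pyCat (pyCat "[Previously used tool: " name_part) "]")]
  else if PySem.Str.startswith content "SYSTEM TOOL RESULT:" then
    let preview := PySem.Str.slice (PySem.Str.strip (PySem.Str.slice content (some 19) none)) none (some 150)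
    [("role", role), ("content", pyCat (pyCat "[Tool result summary: " preview) "...]")]
  else
    let preview := if PySem.Str.len content > 300 then pyCat (PySem.Str.slice content none (some 300)) "..." else content
    [("role", role), ("content", preview)]

def pgh_topic (msg : List (String × String)) : List (String × String) :=
  let role := PySem.Dict.getD ⟨msg⟩ "role" "user"
  let content := PySem.Dict.getD ⟨msg⟩ "content" ""
  if PySem.Str.startswith content "[TOOL:" then
    let tool_body := pyRstrip (PySem.Str.slice content (some 6) none) "]"
    let name_part := PySem.Str.strip (pySplitHead tool_body "(")
    [("role", role), ("content", pyCat (pyCat "[Past action: " name_part) "]")]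
  else
    [("role", role), ("content", pyCat (pyCat "[Past message: " (PySem.Str.slice content none (some 80))) "...]")]

def process_generational_history_alt (history : List (List (String × String))) (max_turns : Int) : List (List (String × String)) :=
  if history = [] then []
  else
    let raw := if (history.length : Int) > max_turns then PySem.List.slice history (some (-max_turns)) none else history
    let n : Int := raw.length
    let full_start := max 0 (n - 15)
    let cond_start := max 0 (n - 30)
    (PySem.List.slice raw none (some cond_start)).map pgh_topic
      ++ (PySem.List.slice raw (some cond_start) (some full_start)).map pgh_condensed
      ++ (PySem.List.slice raw (some full_start) none).map pgh_full

-- ===== PRECONDITION & SPEC =====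
def Spec_process_generational_history (history : List (List (String × String))) (max_turns : Int) (out : List (List (String × String))) : Prop := out = process_generational_history_alt history max_turns
instance (history : List (List (String × String))) (max_turns : Int) (out : List (List (String × String))) : Decidable (Spec_process_generational_history history max_turns out) := by unfold Spec_process_generational_history; infer_instance

-- ===== CLAIM (what is proved, stated in full; the proofs are below) =====
def Claim_equal_process_generational_history : Prop := ∀ (history : List (List (String × String))) (max_turns : Int), Dom_process_generational_history history max_turns → Spec_process_generational_history history max_turns (process_generational_history history max_turns)

-- ===== LEMMAS AND PROOFS =====

-- A's per-message body, abstracted over the reversed generation index (identical to the loop body of port A)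
def pgh_bodyA (i : Int) (msg : List (String × String)) : List (String × String) :=
  let role := PySem.Dict.getD ⟨msg⟩ "role" "user"
  let content := PySem.Dict.getD ⟨msg⟩ "content" ""
  if i < 15 then
    [("role", role), ("content", content)]
  else if i < 30 then
    if PySem.Str.startswith content "[TOOL:" then
      let tool_body := pyRstrip (PySem.Str.slice content (some 6) none) "]"
      let name_part := PySem.Str.strip (pySplitHead tool_body "(")
      [("role", role), ("content", pyCat (pyCat "[Previously used tool: " name_part) "]")]
    else if PySem.Str.startswith content "SYSTEM TOOL RESULT:" then
      let preview := PySem.Str.slice (PySem.Str.strip (PySem.Str.slice content (some 19) none)) none (some 150)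
      [("role", role), ("content", pyCat (pyCat "[Tool result summary: " preview) "...]")]
    else
      let preview := if PySem.Str.len content > 300 then pyCat (PySem.Str.slice content none (some 300)) "..." else content
      [("role", role), ("content", preview)]
  else
    if PySem.Str.startswith content "[TOOL:" then
      let tool_body := pyRstrip (PySem.Str.slice content (some 6) none) "]"
      let name_part := PySem.Str.strip (pySplitHead tool_body "(")
      [("role", role), ("content", pyCat (pyCat "[Past action: " name_part) "]")]
    else
      [("role", role), ("content", pyCat (pyCat "[Past message: " (PySem.Str.slice content none (some 80))) "...]")]

lemma pgh_bodyA_full (i : Int) (msg : List (String × String)) (h : i < 15) :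
    pgh_bodyA i msg = pgh_full msg := by
  simp [pgh_bodyA, pgh_full, h]

lemma pgh_bodyA_cond (i : Int) (msg : List (String × String)) (h1 : ¬ i < 15) (h2 : i < 30) :
    pgh_bodyA i msg = pgh_condensed msg := by
  simp [pgh_bodyA, pgh_condensed, h1, h2]

lemma pgh_bodyA_topic (i : Int) (msg : List (String × String)) (h1 : ¬ i < 15) (h2 : ¬ i < 30) :
    pgh_bodyA i msg = pgh_topic msg := by
  simp [pgh_bodyA, pgh_topic, h1, h2]

lemma pgh_foldl_cons {α β : Type} (l : List α) (f : α → β) (acc : List β) :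
    l.foldl (fun a x => f x :: a) acc = (l.map f).reverse ++ acc := by
  induction l generalizing acc with
  | nil => rfl
  | cons x t ih => simp [ih]

-- the core fact: reversed generation-indexed mapping = three forward slices
lemma pgh_core (raw : List (List (String × String))) :
    ((PySem.List.enumerate raw.reverse).map (fun p => pgh_bodyA p.1 p.2)).reverse
      = (PySem.List.slice raw none (some (max 0 ((raw.length : Int) - 30)))).map pgh_topic
        ++ (PySem.List.slice raw (some (max 0 ((raw.length : Int) - 30))) (some (max 0 ((raw.length : Int) - 15)))).map pgh_condensed
        ++ (PySem.List.slice raw (some (max 0 ((raw.length : Int) - 15))) none).map pgh_full := by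
  set n := raw.length with hn
  have hc : (max 0 ((n : Int) - 30)) = ((n - 30 : Nat) : Int) := by omega
  have hf : (max 0 ((n : Int) - 15)) = ((n - 15 : Nat) : Int) := by omega
  rw [hc, hf, PySem.List.slice_to raw (Int.natCast_nonneg _), PySem.List.slice_natCast,
      PySem.List.slice_from raw (Int.natCast_nonneg _)]
  simp only [Int.toNat_natCast]
  apply List.ext_getElem
  · simp; omega
  · intro j hj1 hj2
    simp only [List.length_reverse, List.length_map, PySem.List.length_enumerate] at hj1
    have hjn : j < n := by simpa using hj1
    rw [List.getElem_reverse]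
    simp only [List.length_map, PySem.List.length_enumerate, List.length_reverse]
    rw [List.getElem_map, PySem.List.getElem_enumerate, List.getElem_reverse]
    simp only [zero_add,
      show raw.length - 1 - (raw.length - 1 - j) = j from by omega]
    by_cases h1 : j < n - 30
    · rw [List.getElem_append_left (by simp; omega), List.getElem_append_left (by simp; omega)]
      simp only [List.getElem_map, List.getElem_take]
      rw [pgh_bodyA_topic _ _ (by omega) (by omega)]
    · by_cases h2 : j < n - 15
      · rw [List.getElem_append_left (by simp; omega), List.getElem_append_right (by simp; omega)]
        simp only [List.length_map, List.length_take, List.getElem_map,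
          List.getElem_take, List.getElem_drop]
        rw [pgh_bodyA_cond _ _ (by omega) (by omega)]
        exact congrArg _ (getElem_congr rfl (by omega) _)
      · rw [List.getElem_append_right (by simp; omega)]
        simp only [List.length_append, List.length_map, List.length_take, List.length_drop,
          List.getElem_map, List.getElem_drop]
        rw [pgh_bodyA_full _ _ (by omega)]
        exact congrArg _ (getElem_congr rfl (by omega) _)

-- ===== VERDICT (by name: the statement is the Claim_ definition above) =====
theorem process_generational_history_spec : Claim_equal_process_generational_history := by
  intro history max_turns _dom
  unfold Spec_process_generational_history process_generational_history process_generational_history_alt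
  by_cases h : history = []
  · simp [h]
  · simp only [h, if_false]
    exact (pgh_foldl_cons _ (fun (p : Int × List (String × String)) => pgh_bodyA p.1 p.2) []).trans
      (by simpa using pgh_core (if (history.length : Int) > max_turns then PySem.List.slice history (some (-max_turns)) none else history))
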